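-- pv_equiv track=rewrite | github.com/jackreichelt/aoc2020 | day17/day17a.py | cubesToCheck
-- ===== SOURCE A (Python) =====
-- def cubesToCheck(cubes):
--   minX = 0
--   maxX = 0
--   minY = 0
--   maxY = 0
--   minZ = 0
--   maxZ = 0
--
--   for x, y, z in cubes.keys():
--     if x < minX:
--       minX = x
--     elif x > maxX:
--       maxX = x
--
--     if y < minY:
--       minY = y
--     elif y > maxY:
--       maxY = y
--
--     if z < minZ:
--       minZ = z
--     elif z > maxZ:
--       maxZ = z
--
--   return minX-1, maxX+1, minY-1, maxY+1, minZ-1, maxZ+1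
-- ===== SOURCE B (Python) =====
-- def cubesToCheck(cubes):
--   xs = [0]
--   ys = [0]
--   zs = [0]
--   for x, y, z in cubes.keys():
--     xs.append(x)
--     ys.append(y)
--     zs.append(z)
--   return min(xs)-1, max(xs)+1, min(ys)-1, max(ys)+1, min(zs)-1, max(zs)+1
-- ===== Notes on version B (the rewrite author's own statement) =====
-- stated objective: simpler
-- what changed: Replaces the per-element if/elif min/max state tracking with building three 0-seeded coordinate lists and reducing them with min/max.
import Mathlib
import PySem

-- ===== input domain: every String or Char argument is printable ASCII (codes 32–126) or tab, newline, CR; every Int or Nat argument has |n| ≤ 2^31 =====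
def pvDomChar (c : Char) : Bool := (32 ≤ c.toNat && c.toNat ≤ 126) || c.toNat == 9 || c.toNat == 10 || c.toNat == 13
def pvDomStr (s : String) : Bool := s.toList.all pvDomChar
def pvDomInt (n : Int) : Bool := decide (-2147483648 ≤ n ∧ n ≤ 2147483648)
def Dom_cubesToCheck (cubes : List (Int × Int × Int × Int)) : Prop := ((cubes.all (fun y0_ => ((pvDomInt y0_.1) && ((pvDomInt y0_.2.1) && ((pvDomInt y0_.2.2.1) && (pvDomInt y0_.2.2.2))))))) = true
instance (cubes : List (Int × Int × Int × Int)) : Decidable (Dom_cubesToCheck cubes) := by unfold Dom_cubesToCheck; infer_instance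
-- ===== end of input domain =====

-- B replaces A's per-element if/elif min/max tracking with three 0-seeded coordinate lists reduced by min/max (simpler decomposition, same cost).


-- ===== PORT A =====
-- the loop body of A: update the six running bounds for one key (x, y, z) (value ignored)
def cubesToCheckStep (st : Int × Int × Int × Int × Int × Int) (c : Int × Int × Int × Int) :
    Int × Int × Int × Int × Int × Int :=
  match st, c with
  | (minX, maxX, minY, maxY, minZ, maxZ), (x, y, z, _) =>
    let px := if x < minX then (x, maxX) else if x > maxX then (minX, x) else (minX, maxX)
    let py := if y < minY then (y, maxY) else if y > maxY then (minY, y) else (minY, maxY)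
    let pz := if z < minZ then (z, maxZ) else if z > maxZ then (minZ, z) else (minZ, maxZ)
    (px.1, px.2, py.1, py.2, pz.1, pz.2)

def cubesToCheck (cubes : List (Int × Int × Int × Int)) : Int × Int × Int × Int × Int × Int :=
  let s := cubes.foldl cubesToCheckStep (0, 0, 0, 0, 0, 0)
  (s.1 - 1, s.2.1 + 1, s.2.2.1 - 1, s.2.2.2.1 + 1, s.2.2.2.2.1 - 1, s.2.2.2.2.2 + 1)

-- ===== PORT B =====
-- B builds three 0-seeded coordinate lists and reduces them with min/max
-- (Python's min/max over the nonempty list 0 :: l is the left fold of min/max from the head 0).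
def cubesToCheck_alt (cubes : List (Int × Int × Int × Int)) : Int × Int × Int × Int × Int × Int :=
  let xs := cubes.map (fun c => c.1)
  let ys := cubes.map (fun c => c.2.1)
  let zs := cubes.map (fun c => c.2.2.1)
  (xs.foldl min 0 - 1, xs.foldl max 0 + 1,
   ys.foldl min 0 - 1, ys.foldl max 0 + 1,
   zs.foldl min 0 - 1, zs.foldl max 0 + 1)

-- ===== PRECONDITION & SPEC =====
def Spec_cubesToCheck (cubes : List (Int × Int × Int × Int)) (out : Int × Int × Int × Int × Int × Int) : Prop := out = cubesToCheck_alt cubes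
instance (cubes : List (Int × Int × Int × Int)) (out : Int × Int × Int × Int × Int × Int) : Decidable (Spec_cubesToCheck cubes out) := by unfold Spec_cubesToCheck; infer_instance

-- ===== CLAIM (what is proved, stated in full; the proofs are below) =====
def Claim_equal_cubesToCheck : Prop := ∀ (cubes : List (Int × Int × Int × Int)), Dom_cubesToCheck cubes → Spec_cubesToCheck cubes (cubesToCheck cubes)

-- ===== LEMMAS AND PROOFS =====

-- one step of A equals independent min/max updates, provided each running min is ≤ its running max
theorem cubesToCheckStep_eq (mnX mxX mnY mxY mnZ mxZ x y z v : Int)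
    (h1 : mnX ≤ mxX) (h2 : mnY ≤ mxY) (h3 : mnZ ≤ mxZ) :
    cubesToCheckStep (mnX, mxX, mnY, mxY, mnZ, mxZ) (x, y, z, v) =
      (min mnX x, max mxX x, min mnY y, max mxY y, min mnZ z, max mxZ z) := by
  simp only [cubesToCheckStep]
  split_ifs <;> simp_all [min_def, max_def] <;> omega

-- A's fold equals three pairs of min/max folds over the projected coordinate lists
theorem cubesToCheck_fold_eq (l : List (Int × Int × Int × Int))
    (mnX mxX mnY mxY mnZ mxZ : Int)
    (h1 : mnX ≤ mxX) (h2 : mnY ≤ mxY) (h3 : mnZ ≤ mxZ) :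
    l.foldl cubesToCheckStep (mnX, mxX, mnY, mxY, mnZ, mxZ) =
      ((l.map (fun c => c.1)).foldl min mnX, (l.map (fun c => c.1)).foldl max mxX,
       (l.map (fun c => c.2.1)).foldl min mnY, (l.map (fun c => c.2.1)).foldl max mxY,
       (l.map (fun c => c.2.2.1)).foldl min mnZ, (l.map (fun c => c.2.2.1)).foldl max mxZ) := by
  induction l generalizing mnX mxX mnY mxY mnZ mxZ with
  | nil => simp
  | cons c t ih =>
    obtain ⟨x, y, z, v⟩ := c
    simp only [List.foldl_cons, List.map_cons]
    rw [cubesToCheckStep_eq _ _ _ _ _ _ _ _ _ _ h1 h2 h3]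
    exact ih _ _ _ _ _ _ (le_trans (min_le_left _ _) (le_trans h1 (le_max_left _ _)))
      (le_trans (min_le_left _ _) (le_trans h2 (le_max_left _ _)))
      (le_trans (min_le_left _ _) (le_trans h3 (le_max_left _ _)))

-- ===== VERDICT (by name: the statement is the Claim_ definition above) =====
theorem cubesToCheck_spec : Claim_equal_cubesToCheck := by
  intro cubes _
  unfold Spec_cubesToCheck cubesToCheck cubesToCheck_alt
  rw [cubesToCheck_fold_eq cubes 0 0 0 0 0 0 le_rfl le_rfl le_rfl]
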